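-- pv_equiv track=rewrite | github.com/VivianChenyc5519/ICS_final | error_correction.py | generate_sum
-- ===== SOURCE A (Python) =====
-- import math
--
-- cap = 4
--
-- def generate_sum(msg):
--     partition = math.ceil(len(msg)/16)
--     data = [[] for m in range(partition)]
--     start, count = 0, 0
--     while count < partition:
--         for c in msg[start:start+16]:
--             if not data[count] or len(data[count][-1]) == cap:
--                 data[count].append([ord(c)])
--             else:
--                 data[count][-1].append(ord(c))
--         while len(data[count][-1]) != cap:
--             data[count][-1].append(0)
--         count += 1
--         start += 16
--
--     row_sums = [[] for m in range(partition)]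
--     for k in range(partition):
--         for lst in data[k]:
--             row_sums[k].append(sum(lst))
--
--     col_sums = [[] for m in range(partition)]
--     for k in range(partition):
--         for j in range(cap):
--             col_sum = 0
--             for lst in data[k]:
--                 col_sum += lst[j]
--             col_sums[k].append(col_sum)
--
--     return data, row_sums, col_sums
-- ===== SOURCE B (Python) =====
-- def generate_sum(msg):
--     # iterative slicing decomposition: 16-char partitions via range-slicing, 4-char ord
--     # groups via range-slicing, pad the last group, row sums by map, col sums by zip-transpose
--     def groups_of(chunk):
--         gs = [[ord(c) for c in chunk[j:j + 4]] for j in range(0, len(chunk), 4)]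
--         return gs[:-1] + [gs[-1] + [0] * (4 - len(gs[-1]))]
--
--     data = [groups_of(msg[i:i + 16]) for i in range(0, len(msg), 16)]
--     row_sums = [[sum(g) for g in gs] for gs in data]
--     col_sums = [[sum(col) for col in zip(*gs)] for gs in data]
--     return data, row_sums, col_sums
-- ===== Notes on version B (the rewrite author's own statement) =====
-- stated objective: simpler
-- what changed: Replaces A's index-driven while loop with per-character group-boundary branching, in-place pad loop and j-indexed column sums by a recursive slicing decomposition: 16-char chunks, 4-char ord slices, one pad of the last group, row sums by mapping sum and column sums by zip-transpose.
import Mathlib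
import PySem

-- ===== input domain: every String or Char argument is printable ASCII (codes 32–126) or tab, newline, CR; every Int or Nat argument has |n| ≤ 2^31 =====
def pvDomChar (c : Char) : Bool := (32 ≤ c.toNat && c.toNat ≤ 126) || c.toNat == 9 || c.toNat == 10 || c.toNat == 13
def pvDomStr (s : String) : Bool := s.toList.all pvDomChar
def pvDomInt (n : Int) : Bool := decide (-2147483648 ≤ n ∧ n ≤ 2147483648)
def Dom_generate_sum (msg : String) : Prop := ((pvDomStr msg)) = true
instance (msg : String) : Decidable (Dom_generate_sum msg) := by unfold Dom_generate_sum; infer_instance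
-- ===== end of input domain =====

-- B replaces A's per-character group-boundary branching and index-based sum loops by a
-- recursive slicing decomposition (16-chunks, 4-groups, pad last, map / zip-transpose); objective: simpler.

-- ===== PORT A =====

def pvCap : Int := 4   -- cap = 4

-- body of `for c in msg[start:start+16]`: branch on `not data[count] or len(data[count][-1]) == cap`
def pvFillStep (gs : List (List Int)) (c : Char) : List (List Int) :=
  if gs = [] ∨ ((gs.getLast!.length : Int) = pvCap) then gs ++ [[(c.toNat : Int)]]
  else gs.dropLast ++ [gs.getLast! ++ [(c.toNat : Int)]]

-- `while len(data[count][-1]) != cap: data[count][-1].append(0)`; the `<` guard only makes the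
-- recursion total (the while runs with length 1..4, where `≠ 4` and `< 4` coincide)
def pvPadWhile (g : List Int) : List Int :=
  if h : g.length < 4 then pvPadWhile (g ++ [0]) else g
termination_by 4 - g.length
decreasing_by simp only [List.length_append, List.length_cons, List.length_nil]; omega

-- `while count < partition:` — each iteration fills data[count] from msg[start:start+16],
-- then pads its last group
def pvLoopA (msg : List Char) (partition : Nat) (count start : Nat)
    (acc : List (List (List Int))) : List (List (List Int)) :=
  if count < partition then
    pvLoopA msg partition (count + 1) (start + 16)
      (acc ++ [(fun gs => gs.dropLast ++ [pvPadWhile gs.getLast!])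
               ((PySem.List.slice msg (some (start : Int)) (some ((start : Int) + 16))).foldl pvFillStep [])])
  else acc
termination_by partition - count

def generate_sum (msg : String) : List (List (List Int)) × List (List Int) × List (List Int) :=
  let cs := msg.toList
  -- math.ceil(len(msg)/16) = (len+15)/16 exactly (the float division is exact at these lengths)
  let partition : Nat := (cs.length + 15) / 16
  let data := pvLoopA cs partition 0 0 []
  -- for k in range(partition): for lst in data[k]: row_sums[k].append(sum(lst))
  let row_sums := (List.range partition).map (fun k => (data.getD k []).map (fun lst => lst.sum))
  -- for k in range(partition): for j in range(cap): col_sum = Σ lst[j]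
  -- (lst[j] as getD j 0: every reachable group has length 4 > j, so no IndexError occurs)
  let col_sums := (List.range partition).map (fun k =>
    (List.range 4).map (fun j => (data.getD k []).foldl (fun s lst => s + lst.getD j 0) 0))
  (data, row_sums, col_sums)

-- ===== PORT B =====

-- groups_of(chunk): gs = [[ord(c) for c in chunk[j:j+4]] for j in range(0, len(chunk), 4)],
-- then gs[:-1] + [gs[-1] + [0] * (4 - len(gs[-1]))]
-- (only called on nonempty chunks, so gs[-1] never hits an empty gs)
def pvGroupsOf (chunk : List Char) : List (List Int) :=
  let gs := (PySem.List.pyRange 0 (chunk.length : Int) 4).map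
    (fun j => (PySem.List.slice chunk (some j) (some (j + 4))).map (fun c => (c.toNat : Int)))
  gs.dropLast ++ [gs.getLast! ++ List.replicate (4 - gs.getLast!.length) 0]

-- zip(*rows): columns while every row still has an element
def pvZipCols (rows : List (List Int)) : List (List Int) :=
  if rows = [] ∨ rows.any (·.isEmpty) then []
  else rows.map (fun r => r.headI) :: pvZipCols (rows.map (fun r => r.tail))
termination_by rows.headI.length
decreasing_by
  rename_i h
  rw [not_or] at h
  obtain ⟨h1, h2⟩ := h
  rcases rows with _|⟨r, rs⟩
  · exact absurd rfl h1
  · have hr : r ≠ [] := by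
      intro hx
      subst hx
      simp at h2
    simp only [List.headI]
    rcases r with _|⟨a, t⟩
    · exact absurd rfl hr
    · simp

def generate_sum_alt (msg : String) : List (List (List Int)) × List (List Int) × List (List Int) :=
  let data := (PySem.List.pyRange 0 (msg.toList.length : Int) 16).map
    (fun i => pvGroupsOf (PySem.List.slice msg.toList (some i) (some (i + 16))))
  let row_sums := data.map (fun groups => groups.map (fun g => g.sum))
  let col_sums := data.map (fun groups => (pvZipCols groups).map (fun col => col.sum))
  (data, row_sums, col_sums)

-- ===== PRECONDITION & SPEC =====
def Spec_generate_sum (msg : String) (out : List (List (List Int)) × List (List Int) × List (List Int)) : Prop := out = generate_sum_alt msg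
instance (msg : String) (out : List (List (List Int)) × List (List Int) × List (List Int)) : Decidable (Spec_generate_sum msg out) := by unfold Spec_generate_sum; infer_instance

-- ===== CLAIM (what is proved, stated in full; the proofs are below) =====
def Claim_equal_generate_sum : Prop := ∀ (msg : String), Dom_generate_sum msg → Spec_generate_sum msg (generate_sum msg)

-- ===== LEMMAS AND PROOFS =====

-- proof-side recursive characterisations of the chunking both programs perform
def pvChunks16 (s : List Char) : List (List Char) :=
  if s = [] then [] else s.take 16 :: pvChunks16 (s.drop 16)
termination_by s.length
decreasing_by rename_i h; have := List.length_pos_of_ne_nil h; simp only [List.length_drop]; omega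

def pvGroups4 (chunk : List Char) : List (List Int) :=
  if chunk = [] then []
  else ((chunk.take 4).map (fun c => (c.toNat : Int))) :: pvGroups4 (chunk.drop 4)
termination_by chunk.length
decreasing_by rename_i h; have := List.length_pos_of_ne_nil h; simp only [List.length_drop]; omega

def pvPadG (groups : List (List Int)) : List (List Int) :=
  groups.dropLast ++ [groups.getLast! ++ List.replicate (4 - groups.getLast!.length) 0]


theorem getLast!_of_ne_nil {α : Type} [Inhabited α] (gs : List α) (h : gs ≠ []) : gs.getLast! = gs.getLast h := by
  rcases gs with _|⟨a,t⟩
  · exact absurd rfl h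
  · rfl

theorem getLast!_mem {α : Type} [Inhabited α] (gs : List α) (h : gs ≠ []) : gs.getLast! ∈ gs := by
  rw [getLast!_of_ne_nil gs h]; exact List.getLast_mem h

theorem getLast!_append_of_ne_nil {α : Type} [Inhabited α] (done gs : List α) (h : gs ≠ []) :
    (done ++ gs).getLast! = gs.getLast! := by
  rw [getLast!_of_ne_nil _ (by simp [h]), getLast!_of_ne_nil _ h, List.getLast_append_of_ne_nil]

theorem getLast!_single {α : Type} [Inhabited α] (x : α) : ([x] : List α).getLast! = x := by
  rw [getLast!_of_ne_nil _ (by simp), List.getLast_singleton]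

-- unconditional unfoldings of pvFillStep
theorem fillStep_nil (c : Char) : pvFillStep [] c = [[(c.toNat : Int)]] := by
  rw [pvFillStep, if_pos (Or.inl rfl), List.nil_append]

theorem fillStep_one (g : List Int) (c : Char) (h : g.length ≤ 3) :
    pvFillStep [g] c = [g ++ [(c.toNat : Int)]] := by
  rw [pvFillStep, if_neg]
  · rw [getLast!_single]
    simp
  · rw [getLast!_single]
    simp only [pvCap]
    rw [not_or]
    refine ⟨by simp, fun hx => ?_⟩
    have : g.length = 4 := by exact_mod_cast hx
    omega

theorem fillStep_fullLast (gs : List (List Int)) (c : Char) (h : gs.getLast!.length = 4) :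
    pvFillStep gs c = gs ++ [[(c.toNat : Int)]] := by
  rw [pvFillStep, if_pos (Or.inr (by rw [h, pvCap]; norm_num))]

theorem fillStep_ne_nil (gs : List (List Int)) (c : Char) : pvFillStep gs c ≠ [] := by
  unfold pvFillStep; split <;> simp

-- fillStep acts only on the tail state: a prefix of finished groups passes through
theorem fillStep_append (done gs : List (List Int)) (c : Char) (h : gs ≠ []) :
    pvFillStep (done ++ gs) c = done ++ pvFillStep gs c := by
  unfold pvFillStep
  rw [getLast!_append_of_ne_nil done gs h, List.dropLast_append_of_ne_nil h]
  by_cases hc : ((gs.getLast!.length : Int) = pvCap)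
  · rw [if_pos (Or.inr hc), if_pos (Or.inr hc), List.append_assoc]
  · rw [if_neg (by rintro (hx | hx); exacts [(by simp [h] at hx), hc hx]),
        if_neg (by rintro (hx | hx); exacts [h hx, hc hx]), List.append_assoc]

theorem foldl_fillStep_append (cs : List Char) (done gs : List (List Int)) (h : gs ≠ []) :
    List.foldl pvFillStep (done ++ gs) cs = done ++ List.foldl pvFillStep gs cs := by
  induction cs generalizing gs with
  | nil => simp
  | cons c cs ih =>
    simp only [List.foldl_cons]
    rw [fillStep_append done gs c h, ih _ (fillStep_ne_nil gs c)]

theorem groups4_nil : pvGroups4 [] = [] := by rw [pvGroups4.eq_def]; simp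

theorem groups4_ne_nil (cs : List Char) (h : cs ≠ []) : pvGroups4 cs ≠ [] := by
  rw [pvGroups4.eq_def]; simp [h]

-- a short chunk fills a single partial group
theorem foldl_fill_partial : ∀ (cs : List Char) (g : List Int),
    g.length + cs.length ≤ 4 → List.foldl pvFillStep [g] cs
      = [g ++ cs.map (fun c => (c.toNat : Int))] := by
  intro cs
  induction cs with
  | nil => intro g _; simp
  | cons c cs ih =>
    intro g h
    simp only [List.length_cons] at h
    simp only [List.foldl_cons]
    rw [fillStep_one g c (by omega), ih _ (by simp only [List.length_append, List.length_cons, List.length_nil]; omega)]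
    simp

theorem foldl_fill_le4 (cs : List Char) (h1 : cs ≠ []) (h2 : cs.length ≤ 4) :
    List.foldl pvFillStep [] cs = [cs.map (fun c => (c.toNat : Int))] := by
  rcases cs with _|⟨c, cs⟩
  · exact absurd rfl h1
  · simp only [List.foldl_cons]
    rw [fillStep_nil, foldl_fill_partial cs [(c.toNat : Int)] (by simp at h2 ⊢; omega)]
    simp

theorem groups4_le4 (cs : List Char) (h1 : cs ≠ []) (h2 : cs.length ≤ 4) :
    pvGroups4 cs = [cs.map (fun c => (c.toNat : Int))] := by
  rw [pvGroups4.eq_def, if_neg h1, List.take_of_length_le h2, List.drop_eq_nil_of_le h2, groups4_nil]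

-- the per-chunk character loop builds exactly the 4-slices of the chunk
theorem foldl_fillStep_eq_groups4 : ∀ (n : Nat) (cs : List Char), cs.length ≤ n →
    List.foldl pvFillStep [] cs = pvGroups4 cs := by
  intro n
  induction n with
  | zero =>
    intro cs h
    have hnil : cs = [] := List.eq_nil_of_length_eq_zero (by omega)
    subst hnil
    simp [groups4_nil]
  | succ n ih =>
    intro cs h
    rcases eq_or_ne cs [] with hnil | hne
    · subst hnil; simp [groups4_nil]
    by_cases h4 : cs.length ≤ 4
    · rw [foldl_fill_le4 cs hne h4, groups4_le4 cs hne h4]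
    · rw [Nat.not_le] at h4
      have hsplit : cs.take 4 ++ cs.drop 4 = cs := List.take_append_drop 4 cs
      have htlen : (cs.take 4).length = 4 := by simp [List.length_take]; omega
      have hrne : cs.drop 4 ≠ [] := by
        intro hx
        have := congrArg List.length hx
        simp at this
        omega
      conv_lhs => rw [← hsplit]
      rw [List.foldl_append,
          foldl_fill_le4 _ (by intro hx; rw [hx] at htlen; simp at htlen) (le_of_eq htlen)]
      rcases hr : cs.drop 4 with _|⟨e, r⟩
      · exact absurd hr hrne
      simp only [List.foldl_cons]
      rw [fillStep_fullLast _ e (by rw [getLast!_single, List.length_map]; exact htlen),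
          foldl_fillStep_append r _ _ (by simp)]
      have he : List.foldl pvFillStep [] (e :: r) = List.foldl pvFillStep [[(e.toNat : Int)]] r := by
        simp only [List.foldl_cons]; rw [fillStep_nil]
      rw [← he, ih (e :: r) (by have := congrArg List.length hr; simp at this ⊢; omega), ← hr]
      conv_rhs => rw [pvGroups4.eq_def, if_neg hne]
      rw [hr]
      simp

-- the pad-while loop appends exactly the missing zeros
theorem padWhile_eq : ∀ (k : Nat) (g : List Int), 4 - g.length ≤ k → g.length ≤ 4 →
    pvPadWhile g = g ++ List.replicate (4 - g.length) 0 := by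
  intro k
  induction k with
  | zero =>
    intro g h1 h2
    have h3 : g.length = 4 := by omega
    rw [pvPadWhile.eq_def]
    simp [h3]
  | succ k ih =>
    intro g h1 h2
    rw [pvPadWhile.eq_def]
    by_cases h : g.length < 4
    · rw [dif_pos h, ih (g ++ [0])
        (by simp only [List.length_append, List.length_cons, List.length_nil]; omega)
        (by simp only [List.length_append, List.length_cons, List.length_nil]; omega)]
      have h5 : 4 - g.length = (4 - (g.length + 1)) + 1 := by omega
      simp only [List.length_append, List.length_cons, List.length_nil, List.append_assoc]
      rw [h5, List.replicate_succ]
      simp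
    · have h3 : g.length = 4 := by omega
      simp [h3]

-- every group of groups_of4 has length between 1 and 4
theorem groups4_len : ∀ (n : Nat) (cs : List Char), cs.length ≤ n →
    ∀ g ∈ pvGroups4 cs, 1 ≤ g.length ∧ g.length ≤ 4 := by
  intro n
  induction n with
  | zero =>
    intro cs h g hg
    have hnil : cs = [] := List.eq_nil_of_length_eq_zero (by omega)
    subst hnil
    rw [groups4_nil] at hg
    simp at hg
  | succ n ih =>
    intro cs h g hg
    rw [pvGroups4.eq_def] at hg
    split at hg
    · simp at hg
    · rename_i hne
      rcases List.mem_cons.mp hg with h1 | h1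
      · subst h1
        have := List.length_pos_of_ne_nil hne
        simp [List.length_take]
        omega
      · exact ih _ (by simp; omega) g h1

-- A's fill-then-pad of one chunk is B's pad(groups_of4(chunk))
theorem chunk_eq (chunk : List Char) (h : chunk ≠ []) :
    (List.foldl pvFillStep [] chunk).dropLast
      ++ [pvPadWhile (List.foldl pvFillStep [] chunk).getLast!]
      = pvPadG (pvGroups4 chunk) := by
  rw [foldl_fillStep_eq_groups4 chunk.length chunk le_rfl]
  have hne := groups4_ne_nil chunk h
  have hlast := getLast!_mem _ hne
  have hlen := (groups4_len chunk.length chunk le_rfl _ hlast).2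
  rw [pvPadG, padWhile_eq 4 _ (by omega) hlen]

-- the main while loop maps the chunk transform over the 16-chunks of the remaining suffix
theorem loopA_eq : ∀ (d : Nat) (msg : List Char) (count : Nat) (acc : List (List (List Int))),
    (msg.length + 15) / 16 - count = d →
    pvLoopA msg ((msg.length + 15) / 16) count (16 * count) acc
      = acc ++ (pvChunks16 (msg.drop (16 * count))).map
          (fun chunk => (fun gs => gs.dropLast ++ [pvPadWhile gs.getLast!])
            (List.foldl pvFillStep [] chunk)) := by
  intro d
  induction d with
  | zero =>
    intro msg count acc h
    rw [pvLoopA.eq_def, if_neg (by omega)]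
    have hdrop : msg.drop (16 * count) = [] := by
      apply List.drop_eq_nil_of_le; omega
    rw [hdrop, pvChunks16]
    simp
  | succ d ih =>
    intro msg count acc h
    have hcount : count < (msg.length + 15) / 16 := by omega
    have hlen : 16 * count < msg.length := by omega
    rw [pvLoopA.eq_def, if_pos hcount]
    have hslice : PySem.List.slice msg (some ((16 * count : Nat) : Int)) (some (((16 * count : Nat) : Int) + 16))
        = (msg.drop (16 * count)).take 16 := by
      have h1 := PySem.List.slice_natCast_add (xs := msg) (j := 16 * count) (n := 16)
      simpa using h1
    have h16 : 16 * (count + 1) = 16 * count + 16 := by ring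
    rw [hslice, ← h16, ih msg (count + 1) _ (by omega)]
    have hrem : msg.drop (16 * count) ≠ [] := by
      intro hx
      have := congrArg List.length hx
      simp at this
      omega
    conv_rhs => rw [pvChunks16.eq_def, if_neg hrem]
    rw [List.map_cons]
    rw [List.drop_drop, h16]
    simp [Nat.add_comm]

theorem chunks16_length : ∀ (n : Nat) (cs : List Char), cs.length ≤ n →
    (pvChunks16 cs).length = (cs.length + 15) / 16 := by
  intro n
  induction n with
  | zero =>
    intro cs h
    have hnil : cs = [] := List.eq_nil_of_length_eq_zero (by omega)
    subst hnil
    rw [pvChunks16.eq_def]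
    simp
  | succ n ih =>
    intro cs h
    rw [pvChunks16.eq_def]
    split
    · rename_i hn; subst hn; simp
    · rename_i hn
      have hpos := List.length_pos_of_ne_nil hn
      simp only [List.length_cons]
      rw [ih _ (by simp; omega)]
      simp only [List.length_drop]
      omega

theorem chunks16_mem_ne_nil : ∀ (n : Nat) (cs : List Char), cs.length ≤ n →
    ∀ c ∈ pvChunks16 cs, c ≠ [] := by
  intro n
  induction n with
  | zero =>
    intro cs h c hc
    have hnil : cs = [] := List.eq_nil_of_length_eq_zero (by omega)
    subst hnil
    rw [pvChunks16.eq_def] at hc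
    simp at hc
  | succ n ih =>
    intro cs h c hc
    rw [pvChunks16.eq_def] at hc
    split at hc
    · simp at hc
    · rename_i hn
      rcases List.mem_cons.mp hc with h1 | h1
      · subst h1
        intro hx
        have h2 := congrArg List.length hx
        have hp := List.length_pos_of_ne_nil hn
        rw [List.length_take, List.length_nil] at h2
        omega
      · exact ih _ (by simp; omega) c h1

-- [f(l[k]) for k in range(len(l))] = map f l
theorem map_range_getD {α β : Type} (l : List α) (f : α → β) (d : α) :
    (List.range l.length).map (fun k => f (l.getD k d)) = l.map f := by
  induction l with
  | nil => simp
  | cons a t ih =>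
    rw [List.length_cons, List.range_succ_eq_map]
    simp only [List.map_cons, List.map_map, List.getD_cons_zero]
    refine congrArg _ ?_
    simpa [Function.comp] using ih

-- every row of padded data has length exactly 4
theorem padB_cons (g : List Int) (rest : List (List Int)) (h : rest ≠ []) :
    pvPadG (g :: rest) = g :: pvPadG rest := by
  rw [pvPadG, pvPadG]
  rw [show g :: rest = [g] ++ rest from rfl,
      List.dropLast_append_of_ne_nil h, getLast!_append_of_ne_nil [g] rest h]
  simp

theorem padB_len : ∀ (n : Nat) (cs : List Char), cs.length ≤ n → cs ≠ [] →
    ∀ g ∈ pvPadG (pvGroups4 cs), g.length = 4 := by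
  intro n
  induction n with
  | zero =>
    intro cs h hne g hg
    exact absurd (List.eq_nil_of_length_eq_zero (by omega)) hne
  | succ n ih =>
    intro cs h hne g hg
    by_cases h4 : cs.length ≤ 4
    · rw [groups4_le4 cs hne h4, pvPadG] at hg
      rw [getLast!_single] at hg
      simp only [List.dropLast_singleton, List.nil_append, List.mem_singleton] at hg
      subst hg
      have hpos := List.length_pos_of_ne_nil hne
      simp
      omega
    · have hdrop : cs.drop 4 ≠ [] := by
        intro hx
        have := congrArg List.length hx
        simp at this
        omega
      rw [pvGroups4.eq_def, if_neg hne] at hg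
      rw [padB_cons _ _ (groups4_ne_nil _ hdrop)] at hg
      rcases List.mem_cons.mp hg with h1 | h1
      · subst h1
        simp [List.length_take]
        omega
      · exact ih _ (by simp; omega) hdrop g h1

theorem padB_ne_nil (cs : List Char) (_h : cs ≠ []) : pvPadG (pvGroups4 cs) ≠ [] := by
  rw [pvPadG]
  simp

-- zip(*rows) on an n-rectangular nonempty list is the list of its n columns
theorem zipCols_rect : ∀ (n : Nat) (rows : List (List Int)), rows ≠ [] →
    (∀ r ∈ rows, r.length = n) →
    pvZipCols rows = (List.range n).map (fun j => rows.map (fun r => r.getD j 0)) := by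
  intro n
  induction n with
  | zero =>
    intro rows hne hlen
    rcases rows with _|⟨r, rs⟩
    · exact absurd rfl hne
    · rw [pvZipCols.eq_def]
      have hr : r.isEmpty = true := by
        rw [List.isEmpty_iff, ← List.length_eq_zero_iff]
        exact hlen r List.mem_cons_self
      simp [hr]
  | succ n ih =>
    intro rows hne hlen
    have hnoempty : ¬ (rows = [] ∨ rows.any (·.isEmpty)) := by
      rw [not_or]
      refine ⟨hne, ?_⟩
      simp only [List.any_eq_true, not_exists, not_and]
      intro r hr
      have hl := hlen r hr
      intro hx
      have hxx : r = [] := by simpa using hx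
      rw [hxx] at hl
      simp at hl
    rw [pvZipCols.eq_def, if_neg hnoempty]
    have hmap_ne : rows.map (fun r => r.tail) ≠ [] := by simp [hne]
    have hmap_len : ∀ r ∈ rows.map (fun r => r.tail), r.length = n := by
      intro r hr
      obtain ⟨r0, hr0, rfl⟩ := List.mem_map.mp hr
      have := hlen r0 hr0
      simp [this]
    rw [ih _ hmap_ne hmap_len, List.range_succ_eq_map]
    simp only [List.map_cons, List.map_map]
    refine congrArg₂ _ ?_ ?_
    · refine List.map_congr_left (fun r hr => ?_)
      have := hlen r hr
      rcases r with _|⟨a,t⟩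
      · simp at this
      · simp [List.headI]
    · refine List.map_congr_left (fun j _ => ?_)
      simp only [Function.comp]
      refine List.map_congr_left (fun r hr => ?_)
      have := hlen r hr
      rcases r with _|⟨a,t⟩
      · simp at this
      · simp

-- Σ over a column j as A computes it
theorem col_fold (gs : List (List Int)) (j : Nat) :
    gs.foldl (fun s lst => s + lst.getD j 0) 0 = (gs.map (fun lst => lst.getD j 0)).sum := by
  simpa using PySem.List.foldl_add gs (fun lst => lst.getD j 0) 0

-- range(0, L, s) comprehensions written over List.range
theorem pyRange16_map {β : Type} (L : Nat) (g : Int → β) :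
    (PySem.List.pyRange 0 (L : Int) 16).map g
      = (List.range ((L + 15) / 16)).map (fun t => g ((16 * t : Nat) : Int)) := by
  rw [PySem.List.pyRange_of_pos 0 (L : Int) (by norm_num)]
  rw [List.map_map]
  have hm : (if (0 : Int) < (L : Int) then (((L : Int) - 0 + 16 - 1) / 16).toNat else 0)
      = (L + 15) / 16 := by
    split <;> omega
  rw [hm]
  refine List.map_congr_left (fun t _ => ?_)
  refine congrArg g ?_
  push_cast
  ring

theorem pyRange4_map {β : Type} (L : Nat) (g : Int → β) :
    (PySem.List.pyRange 0 (L : Int) 4).map g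
      = (List.range ((L + 3) / 4)).map (fun t => g ((4 * t : Nat) : Int)) := by
  rw [PySem.List.pyRange_of_pos 0 (L : Int) (by norm_num)]
  rw [List.map_map]
  have hm : (if (0 : Int) < (L : Int) then (((L : Int) - 0 + 4 - 1) / 4).toNat else 0)
      = (L + 3) / 4 := by
    split <;> omega
  rw [hm]
  refine List.map_congr_left (fun t _ => ?_)
  refine congrArg g ?_
  push_cast
  ring

-- [chunk[j:j+4] for j in range(0,len,4)] (with ord applied) is the recursive 4-slicing
theorem rangeMap_groups4 : ∀ (m : Nat) (cs : List Char), m = (cs.length + 3) / 4 →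
    (List.range m).map (fun t => ((cs.drop (4 * t)).take 4).map (fun c => (c.toNat : Int)))
      = pvGroups4 cs := by
  intro m
  induction m with
  | zero =>
    intro cs h
    have hnil : cs = [] := List.eq_nil_of_length_eq_zero (by omega)
    subst hnil
    simp [groups4_nil]
  | succ m ih =>
    intro cs h
    have hne : cs ≠ [] := by
      intro hx
      subst hx
      simp at h
    rw [List.range_succ_eq_map, List.map_cons, List.map_map]
    conv_rhs => rw [pvGroups4.eq_def, if_neg hne]
    refine congrArg₂ _ (by simp) ?_
    have hcongr : ∀ t ∈ List.range m,
        (((fun t => ((cs.drop (4 * t)).take 4).map (fun c => (c.toNat : Int))) ∘ Nat.succ) t)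
          = (((cs.drop 4).drop (4 * t)).take 4).map (fun c => (c.toNat : Int)) := by
      intro t _
      simp only [Function.comp, List.drop_drop]
      have : 4 * t.succ = 4 + 4 * t := by omega
      rw [this, Nat.add_comm]
    rw [List.map_congr_left hcongr,
        ih (cs.drop 4) (by simp only [List.length_drop]; omega)]

-- [f(s[i:i+16]) for i in range(0,len,16)] is f mapped over the recursive 16-chunking
theorem rangeMap_chunks16 {β : Type} (f : List Char → β) :
    ∀ (m : Nat) (cs : List Char), m = (cs.length + 15) / 16 →
    (List.range m).map (fun t => f ((cs.drop (16 * t)).take 16)) = (pvChunks16 cs).map f := by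
  intro m
  induction m with
  | zero =>
    intro cs h
    have hnil : cs = [] := List.eq_nil_of_length_eq_zero (by omega)
    subst hnil
    rw [pvChunks16.eq_def]
    simp
  | succ m ih =>
    intro cs h
    have hne : cs ≠ [] := by
      intro hx
      subst hx
      simp at h
    rw [List.range_succ_eq_map, List.map_cons, List.map_map]
    conv_rhs => rw [pvChunks16.eq_def, if_neg hne]
    rw [List.map_cons]
    refine congrArg₂ _ (by simp) ?_
    have hcongr : ∀ t ∈ List.range m,
        (((fun t => f ((cs.drop (16 * t)).take 16)) ∘ Nat.succ) t)
          = f (((cs.drop 16).drop (16 * t)).take 16) := by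
      intro t _
      simp only [Function.comp, List.drop_drop]
      have : 16 * t.succ = 16 + 16 * t := by omega
      rw [this, Nat.add_comm]
    rw [List.map_congr_left hcongr,
        ih (cs.drop 16) (by simp only [List.length_drop]; omega)]

-- B's groups_of(chunk) = pad applied to the recursive 4-slicing
theorem groupsOf_eq (chunk : List Char) : pvGroupsOf chunk = pvPadG (pvGroups4 chunk) := by
  simp only [pvGroupsOf]
  have hgs : (PySem.List.pyRange 0 (chunk.length : Int) 4).map
      (fun j => (PySem.List.slice chunk (some j) (some (j + 4))).map (fun c => (c.toNat : Int)))
      = pvGroups4 chunk := by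
    rw [pyRange4_map chunk.length]
    calc (List.range ((chunk.length + 3) / 4)).map
          (fun t => (PySem.List.slice chunk (some ((4 * t : Nat) : Int))
            (some (((4 * t : Nat) : Int) + 4))).map (fun c => (c.toNat : Int)))
        = (List.range ((chunk.length + 3) / 4)).map
            (fun t => ((chunk.drop (4 * t)).take 4).map (fun c => (c.toNat : Int))) := by
          refine List.map_congr_left (fun t _ => ?_)
          have h1 := PySem.List.slice_natCast_add (xs := chunk) (j := 4 * t) (n := 4)
          refine congrArg _ ?_
          simpa using h1
      _ = pvGroups4 chunk := rangeMap_groups4 _ chunk rfl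
  rw [hgs, pvPadG]

-- B's data comprehension = the recursive 16-chunking mapped through pad ∘ groups
theorem altData_eq (cs : List Char) :
    (PySem.List.pyRange 0 (cs.length : Int) 16).map
      (fun i => pvGroupsOf (PySem.List.slice cs (some i) (some (i + 16))))
      = (pvChunks16 cs).map (fun chunk => pvPadG (pvGroups4 chunk)) := by
  rw [pyRange16_map cs.length]
  calc (List.range ((cs.length + 15) / 16)).map
        (fun t => pvGroupsOf (PySem.List.slice cs (some ((16 * t : Nat) : Int))
          (some (((16 * t : Nat) : Int) + 16))))
      = (List.range ((cs.length + 15) / 16)).map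
          (fun t => pvGroupsOf ((cs.drop (16 * t)).take 16)) := by
        refine List.map_congr_left (fun t _ => ?_)
        have h1 := PySem.List.slice_natCast_add (xs := cs) (j := 16 * t) (n := 16)
        refine congrArg _ ?_
        simpa using h1
    _ = (pvChunks16 cs).map pvGroupsOf := rangeMap_chunks16 pvGroupsOf _ cs rfl
    _ = (pvChunks16 cs).map (fun chunk => pvPadG (pvGroups4 chunk)) :=
        List.map_congr_left (fun chunk _ => groupsOf_eq chunk)

-- ===== VERDICT (by name: the statement is the Claim_ definition above) =====
theorem generate_sum_spec : Claim_equal_generate_sum := by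
  intro msg _
  unfold Spec_generate_sum generate_sum generate_sum_alt
  set cs := msg.toList with hcs
  rw [altData_eq cs]
  have hdata : pvLoopA cs ((cs.length + 15) / 16) 0 0 []
      = (pvChunks16 cs).map (fun chunk => pvPadG (pvGroups4 chunk)) := by
    have h1 := loopA_eq ((cs.length + 15) / 16) cs 0 [] (by omega)
    simp only [Nat.mul_zero, List.drop_zero, List.nil_append] at h1
    rw [h1]
    exact List.map_congr_left (fun chunk hc => by
      simpa using chunk_eq chunk (chunks16_mem_ne_nil cs.length cs le_rfl chunk hc))
  simp only [hdata]
  refine Prod.ext rfl (Prod.ext ?_ ?_) <;> simp only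
  · -- row sums
    set data := (pvChunks16 cs).map (fun chunk => pvPadG (pvGroups4 chunk)) with hdef
    have hlen : data.length = (cs.length + 15) / 16 := by
      rw [hdef, List.length_map, chunks16_length cs.length cs le_rfl]
    rw [← hlen, map_range_getD data (fun gs => gs.map (fun lst => lst.sum)) []]
  · -- col sums
    set data := (pvChunks16 cs).map (fun chunk => pvPadG (pvGroups4 chunk)) with hdef
    have hlen : data.length = (cs.length + 15) / 16 := by
      rw [hdef, List.length_map, chunks16_length cs.length cs le_rfl]
    rw [← hlen, map_range_getD data (fun gs =>
      (List.range 4).map (fun j => gs.foldl (fun s lst => s + lst.getD j 0) 0)) []]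
    refine List.map_congr_left (fun gs hgs => ?_)
    obtain ⟨chunk, hchunk, rfl⟩ := List.mem_map.mp hgs
    have hchne : chunk ≠ [] := chunks16_mem_ne_nil cs.length cs le_rfl chunk hchunk
    rw [zipCols_rect 4 _ (padB_ne_nil chunk hchne) (padB_len chunk.length chunk le_rfl hchne)]
    rw [List.map_map]
    refine List.map_congr_left (fun j _ => ?_)
    simp only [Function.comp]
    rw [col_fold]
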